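-- pv_equiv track=rewrite | github.com/bguillem/sudo_ku | sudo_ku.py | check_if_no_duplicates
-- ===== SOURCE A (Python) =====
-- def check_if_no_duplicates(line):
--     dup = "0123456789"
--     duplicates = list(dup)
--     ind_in_duplicate = 0
--     index = 0
--
--     while (index < len(line)):
--         if (line[index] >= '0' and line[index] <= '9'):
--             ind_in_duplicate = int(line[index])
--             if (duplicates[ind_in_duplicate] == "x" and ind_in_duplicate != 0):
--                 return False
--             else:
--                 duplicates[ind_in_duplicate] = "x"
--         index += 1
--     return True
-- ===== SOURCE B (Python) =====
-- def check_if_no_duplicates(line):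
--     digits = [c for c in line if c >= '0' and c <= '9' and c != '0']
--     return len(digits) == len(set(digits))
-- ===== Notes on version B (the rewrite author's own statement) =====
-- stated objective: simpler
-- what changed: Replaces the incremental marker-array scan with early exit by collecting the nonzero digit characters in one comprehension and comparing total count against distinct count.
import Mathlib
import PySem

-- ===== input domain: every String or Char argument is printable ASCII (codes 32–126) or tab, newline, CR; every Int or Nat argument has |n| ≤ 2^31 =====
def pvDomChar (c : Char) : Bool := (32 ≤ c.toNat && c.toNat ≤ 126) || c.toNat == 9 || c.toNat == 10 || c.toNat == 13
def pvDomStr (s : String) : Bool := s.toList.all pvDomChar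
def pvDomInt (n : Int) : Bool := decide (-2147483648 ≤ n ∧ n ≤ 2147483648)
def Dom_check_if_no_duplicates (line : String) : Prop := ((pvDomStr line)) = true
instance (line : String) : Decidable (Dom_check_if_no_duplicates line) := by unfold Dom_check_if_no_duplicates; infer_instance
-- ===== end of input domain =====

-- B replaces A's marker-array scan with early exit by a single filter of the nonzero
-- digit characters followed by a total-count vs distinct-count comparison (objective: simpler).

-- ===== PORT A =====
-- while-loop over the indices of line, carrying the mutable `duplicates` marker list;
-- int(line[index]) on a char guarded by '0' <= c <= '9' is exactly c.toNat - 48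
def pvALoop : List Char → List String → Bool
  | [], _ => true
  | c :: rest, duplicates =>
    if '0' ≤ c ∧ c ≤ '9' then
      let ind := c.toNat - 48
      if duplicates.getD ind "" = "x" ∧ ind ≠ 0 then false
      else pvALoop rest (duplicates.set ind "x")
    else pvALoop rest duplicates

def check_if_no_duplicates (line : String) : Bool :=
  pvALoop line.toList ["0", "1", "2", "3", "4", "5", "6", "7", "8", "9"]

-- ===== PORT B =====
def check_if_no_duplicates_alt (line : String) : Bool :=
  let digits := line.toList.filter (fun c => decide ('0' ≤ c) && decide (c ≤ '9') && (c != '0'))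
  digits.length == (PySem.Set.ofList digits).length

-- ===== PRECONDITION & SPEC =====
def Spec_check_if_no_duplicates (line : String) (out : Bool) : Prop := out = check_if_no_duplicates_alt line
instance (line : String) (out : Bool) : Decidable (Spec_check_if_no_duplicates line out) := by unfold Spec_check_if_no_duplicates; infer_instance

-- ===== CLAIM (what is proved, stated in full; the proofs are below) =====
def Claim_equal_check_if_no_duplicates : Prop := ∀ (line : String), Dom_check_if_no_duplicates line → Spec_check_if_no_duplicates line (check_if_no_duplicates line)

-- ===== LEMMAS AND PROOFS =====

theorem pv_len_ofList_iff {α : Type} [BEq α] [LawfulBEq α] (l : List α) :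
    (l.length = (PySem.Set.ofList l).length) ↔ l.Nodup := by
  induction l using List.reverseRecOn with
  | nil => simp [PySem.Set.ofList]
  | append_singleton xs x ih =>
    rw [PySem.Set.ofList_append_singleton]
    by_cases hx : x ∈ PySem.Set.ofList xs
    · have hadd : PySem.Set.add (PySem.Set.ofList xs) x = PySem.Set.ofList xs := by
        simp [PySem.Set.add, hx]
      rw [hadd]
      have hle := PySem.Set.length_ofList_le (xs := xs)
      have hx' : x ∈ xs := (PySem.Set.mem_ofList xs x).1 hx
      simp only [List.length_append, List.length_singleton]
      constructor
      · intro h; omega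
      · intro h
        simp [List.nodup_append] at h
        exact absurd hx' (fun hmem => h.2 x hmem rfl)
    · have hadd : PySem.Set.add (PySem.Set.ofList xs) x = PySem.Set.ofList xs ++ [x] := by
        simp [PySem.Set.add, hx]
      rw [hadd]
      have hx' : x ∉ xs := fun h => hx ((PySem.Set.mem_ofList xs x).2 h)
      simp only [List.length_append, List.length_singleton, List.nodup_append,
        List.nodup_singleton]
      constructor
      · intro h
        refine ⟨ih.1 (by omega), trivial, ?_⟩
        intro a ha b hb; simp at hb; subst hb; exact fun hab => hx' (hab ▸ ha)
      · intro h
        have := ih.2 h.1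
        omega

def pvP (c : Char) : Bool := decide ('0' ≤ c) && decide (c ≤ '9') && (c != '0')

theorem pv_char_eq_of_toNat (c d : Char) (h : c.toNat = d.toNat) : c = d :=
  Char.ext (UInt32.toNat_inj.mp h)

theorem pvP_toNat (c : Char) (h : pvP c = true) : 49 ≤ c.toNat ∧ c.toNat ≤ 57 := by
  simp only [pvP, Bool.and_eq_true, decide_eq_true_eq, bne_iff_ne] at h
  obtain ⟨⟨h0, h9⟩, hne⟩ := h
  rw [Char.le_def] at h0 h9
  have h48 : c.toNat ≠ 48 := fun he => hne (pv_char_eq_of_toNat c '0' (by simpa using he))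
  have h0' : (48 : Nat) ≤ c.toNat := by simpa using UInt32.le_iff_toNat_le.mp h0
  have h9' : c.toNat ≤ 57 := by simpa using UInt32.le_iff_toNat_le.mp h9
  constructor <;> omega

theorem pv_getD_set_self (l : List String) (n : Nat) (h : n < l.length) :
    (l.set n "x").getD n "" = "x" := by
  simp [List.getD, h]

theorem pv_getD_set_ne (l : List String) (n m : Nat) (h : m ≠ n) :
    (l.set n "x").getD m "" = l.getD m "" := by
  simp [List.getD, List.getElem?_set_ne (Ne.symm h)]

theorem pvALoop_iff (cs : List Char) : ∀ (dups : List String), dups.length = 10 →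
    (pvALoop cs dups = true ↔
      ((cs.filter pvP).Nodup ∧ ∀ c ∈ cs.filter pvP, dups.getD (c.toNat - 48) "" ≠ "x")) := by
  induction cs with
  | nil => intro dups _; simp [pvALoop]
  | cons c rest ih =>
    intro dups hlen
    by_cases hd : '0' ≤ c ∧ c ≤ '9'
    · obtain ⟨h0, h9⟩ := hd
      have hb : 48 ≤ c.toNat ∧ c.toNat ≤ 57 := by
        rw [Char.le_def] at h0 h9
        have h0' : (48 : Nat) ≤ c.toNat := by simpa using UInt32.le_iff_toNat_le.mp h0
        have h9' : c.toNat ≤ 57 := by simpa using UInt32.le_iff_toNat_le.mp h9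
        exact ⟨h0', h9'⟩
      have hindlt : c.toNat - 48 < 10 := by omega
      by_cases hz : c = '0'
      · have hind0 : c.toNat - 48 = 0 := by subst hz; decide
        have hpc : pvP c = false := by subst hz; decide
        have hloop : pvALoop (c :: rest) dups = pvALoop rest (dups.set (c.toNat - 48) "x") := by
          simp [pvALoop, h0, h9, hind0]
        rw [hloop, ih _ (by simpa using hlen), List.filter_cons_of_neg (by simp [hpc])]
        constructor
        · rintro ⟨hn, hall⟩
          refine ⟨hn, fun c' hc' => ?_⟩
          have h49 := pvP_toNat c' (List.of_mem_filter hc')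
          rw [← pv_getD_set_ne dups (c.toNat - 48) (c'.toNat - 48) (by omega)]
          exact hall c' hc'
        · rintro ⟨hn, hall⟩
          refine ⟨hn, fun c' hc' => ?_⟩
          have h49 := pvP_toNat c' (List.of_mem_filter hc')
          rw [pv_getD_set_ne dups (c.toNat - 48) (c'.toNat - 48) (by omega)]
          exact hall c' hc'
      · have h49 : 49 ≤ c.toNat := by
          have : c.toNat ≠ 48 := fun he => hz (pv_char_eq_of_toNat c '0' (by simpa using he))
          omega
        have hpc : pvP c = true := by
          simp [pvP, h0, h9, hz]
        have hind0 : c.toNat - 48 ≠ 0 := by omega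
        rw [List.filter_cons_of_pos hpc]
        by_cases hm : dups.getD (c.toNat - 48) "" = "x"
        · have hm2 : dups[c.toNat - 48]?.getD "" = "x" := by simpa [List.getD] using hm
          have hloop : pvALoop (c :: rest) dups = false := by
            simp [pvALoop, h0, h9, hm2, hind0]
          rw [hloop]
          apply iff_of_false (by simp)
          rintro ⟨_, hall⟩
          exact hall c List.mem_cons_self hm
        · have hm2 : ¬ dups[c.toNat - 48]?.getD "" = "x" := by simpa [List.getD] using hm
          have hloop : pvALoop (c :: rest) dups = pvALoop rest (dups.set (c.toNat - 48) "x") := by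
            simp [pvALoop, h0, h9, hm2]
          rw [hloop, ih _ (by simpa using hlen)]
          constructor
          · rintro ⟨hn, hall⟩
            refine ⟨List.nodup_cons.mpr ⟨fun hmem => ?_, hn⟩, fun c' hc' => ?_⟩
            · exact absurd (by rw [pv_getD_set_self dups _ (hlen ▸ hindlt)]) (hall c hmem)
            · rcases List.mem_cons.mp hc' with hc' | hc'
              · subst hc'; exact hm
              · intro he
                by_cases hcc : c'.toNat - 48 = c.toNat - 48
                · have h49' := pvP_toNat c' (List.of_mem_filter hc')
                  have hceq : c' = c := pv_char_eq_of_toNat c' c (by omega)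
                  have hset := hall c' hc'
                  rw [hceq, pv_getD_set_self dups _ (hlen ▸ hindlt)] at hset
                  exact hset rfl
                · exact absurd (by rw [pv_getD_set_ne dups _ _ hcc]; exact he) (hall c' hc')
          · rintro ⟨hn, hall⟩
            obtain ⟨hnotmem, hn'⟩ := List.nodup_cons.mp hn
            refine ⟨hn', fun c' hc' => ?_⟩
            by_cases hcc : c'.toNat - 48 = c.toNat - 48
            · have h49' := pvP_toNat c' (List.of_mem_filter hc')
              have : c' = c := pv_char_eq_of_toNat c' c (by omega)
              exact absurd (this ▸ hc') hnotmem
            · rw [pv_getD_set_ne dups _ _ hcc]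
              exact hall c' (List.mem_cons_of_mem _ hc')
    · have hpc : pvP c = false := by
        simp only [pvP, Bool.and_eq_false_iff]
        left
        rcases not_and_or.mp hd with h | h <;> simp [h]
      have hloop : pvALoop (c :: rest) dups = pvALoop rest dups := by
        simp [pvALoop, hd]
      rw [hloop, ih _ hlen, List.filter_cons_of_neg (by simp [hpc])]

theorem pv_init_getD (n : Nat) (h : n < 10) :
    (["0", "1", "2", "3", "4", "5", "6", "7", "8", "9"] : List String).getD n "" ≠ "x" := by
  interval_cases n <;> decide

theorem check_if_no_duplicates_spec : Claim_equal_check_if_no_duplicates := by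
  intro line _
  show check_if_no_duplicates line = check_if_no_duplicates_alt line
  rw [Bool.eq_iff_iff]
  unfold check_if_no_duplicates check_if_no_duplicates_alt
  rw [pvALoop_iff line.toList _ (by decide)]
  have hfn : (fun c => decide ('0' ≤ c) && decide (c ≤ '9') && (c != '0')) = pvP := rfl
  rw [hfn]
  constructor
  · rintro ⟨hn, _⟩
    simpa [beq_iff_eq] using (pv_len_ofList_iff _).mpr hn
  · intro h
    have hn := (pv_len_ofList_iff (List.filter pvP line.toList)).mp (by simpa [beq_iff_eq] using h)
    refine ⟨hn, fun c hc => ?_⟩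
    have h49 := pvP_toNat c (List.of_mem_filter hc)
    exact pv_init_getD (c.toNat - 48) (by omega)
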